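-- pv_equiv track=rewrite | github.com/eibrahants/Guarda-Roupa-Inteligente | Backend/feedback_learning.py | _extrair_preferencias_combinacao
-- ===== SOURCE A (Python) =====
-- from typing import Dict, Any, List, Optional
--
-- def _extrair_preferencias_combinacao(combinacao: Dict[str, Any]) -> Dict[str, List[str]]:
--     """Extrai preferências da combinação (cores, estilos, tipos)"""
--     preferencias = {
--         'cor': [],
--         'estilo': [],
--         'tipo_roupa': []
--     }
--
--     for categoria, roupa in combinacao.items():
--         if roupa:
--             if roupa.get('cor'):
--                 preferencias['cor'].append(roupa['cor'])
--             if roupa.get('estilo'):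
--                 preferencias['estilo'].append(roupa['estilo'])
--             if roupa.get('tipo'):
--                 preferencias['tipo_roupa'].append(roupa['tipo'])
--
--     return preferencias
-- ===== SOURCE B (Python) =====
-- def _extrair_preferencias_combinacao(combinacao):
--     """Extrai preferências da combinação (cores, estilos, tipos)"""
--     destino = {'cor': 'cor', 'estilo': 'estilo', 'tipo': 'tipo_roupa'}
--     preferencias = {'cor': [], 'estilo': [], 'tipo_roupa': []}
--     for roupa in combinacao.values():
--         if not roupa:
--             continue
--         for chave, valor in roupa.items():
--             campo = destino.get(chave)
--             if campo and valor:
--                 preferencias[campo].append(valor)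
--     return preferencias
-- ===== Notes on version B (the rewrite author's own statement) =====
-- stated objective: alternative
-- what changed: Instead of A's three fixed key lookups (.get) per garment, B scans each garment's items once and dispatches each (key, value) pair through a key-to-field mapping table into a dict of buckets; the Lean Pre_ only states the Python-dict invariant that each garment's keys are distinct (no Python input is excluded).
import Mathlib
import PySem

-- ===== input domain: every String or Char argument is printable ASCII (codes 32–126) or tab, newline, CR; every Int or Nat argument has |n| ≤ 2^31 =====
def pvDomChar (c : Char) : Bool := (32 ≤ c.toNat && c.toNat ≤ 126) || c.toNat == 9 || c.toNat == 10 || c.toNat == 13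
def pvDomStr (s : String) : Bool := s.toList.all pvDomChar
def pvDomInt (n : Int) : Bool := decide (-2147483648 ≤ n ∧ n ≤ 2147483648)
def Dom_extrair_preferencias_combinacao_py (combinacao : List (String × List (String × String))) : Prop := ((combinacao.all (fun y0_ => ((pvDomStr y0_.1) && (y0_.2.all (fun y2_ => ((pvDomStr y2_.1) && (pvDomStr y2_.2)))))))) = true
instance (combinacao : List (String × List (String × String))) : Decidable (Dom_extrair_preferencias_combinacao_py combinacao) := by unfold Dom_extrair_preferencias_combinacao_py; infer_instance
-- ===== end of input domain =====

-- B replaces A's three per-garment key lookups by a single scan over each garment's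
-- items with a key→field dispatch table feeding a dict of buckets (alternative
-- decomposition, same O(n) cost); equivalence needs each garment's keys distinct,
-- which the Python dict type guarantees.


-- ===== PORT A =====
-- A's loop body: for each (categoria, roupa), if roupa is truthy, append the
-- truthy 'cor' / 'estilo' / 'tipo' values to the three accumulator lists.
def pvStepA (acc : List String × List String × List String)
    (cr : String × List (String × String)) : List String × List String × List String :=
  if cr.2 ≠ [] then
    let acc1 := match cr.2.lookup "cor" with
      | some v => if v ≠ "" then (acc.1 ++ [v], acc.2.1, acc.2.2) else acc
      | none => acc
    let acc2 := match cr.2.lookup "estilo" with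
      | some v => if v ≠ "" then (acc1.1, acc1.2.1 ++ [v], acc1.2.2) else acc1
      | none => acc1
    match cr.2.lookup "tipo" with
      | some v => if v ≠ "" then (acc2.1, acc2.2.1, acc2.2.2 ++ [v]) else acc2
      | none => acc2
  else acc

def extrair_preferencias_combinacao_py (combinacao : List (String × List (String × String))) : List (String × List String) :=
  let st := combinacao.foldl pvStepA ([], [], [])
  [("cor", st.1), ("estilo", st.2.1), ("tipo_roupa", st.2.2)]

-- ===== PORT B =====
-- destino = {'cor': 'cor', 'estilo': 'estilo', 'tipo': 'tipo_roupa'}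
def pvDestino : PySem.Dict String String :=
  PySem.Dict.mk [("cor", "cor"), ("estilo", "estilo"), ("tipo", "tipo_roupa")]

-- inner loop body: for chave, valor in roupa.items(): campo = destino.get(chave);
-- if campo and valor: preferencias[campo].append(valor)
def pvInnerB (pref : PySem.Dict String (List String)) (item : String × String) :
    PySem.Dict String (List String) :=
  match pvDestino.get? item.1 with
  | some campo => if campo ≠ "" ∧ item.2 ≠ "" then pref.modify campo [] (· ++ [item.2]) else pref
  | none => pref

def extrair_preferencias_combinacao_py_alt (combinacao : List (String × List (String × String))) : List (String × List String) :=
  (combinacao.foldl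
    (fun pref cr => if cr.2 ≠ [] then cr.2.foldl pvInnerB pref else pref)
    (PySem.Dict.mk [("cor", []), ("estilo", []), ("tipo_roupa", [])])).items

-- ===== PRECONDITION & SPEC =====
-- Pre_ only states the invariant of the Python dict type each garment is: its keys
-- are pairwise distinct (an association list with duplicate keys encodes no Python
-- dict, so no Python input is excluded).
def Pre_extrair_preferencias_combinacao_py (combinacao : List (String × List (String × String))) : Prop :=
  ∀ cr ∈ combinacao, (cr.2.map Prod.fst).Nodup
instance (combinacao : List (String × List (String × String))) : Decidable (Pre_extrair_preferencias_combinacao_py combinacao) := by unfold Pre_extrair_preferencias_combinacao_py; infer_instance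
def pvWitness_extrair_preferencias_combinacao_py : (List (String × List (String × String))) :=
  [("torso", [("cor", "azul"), ("tipo", "camisa")]), ("pernas", [])]

def Spec_extrair_preferencias_combinacao_py (combinacao : List (String × List (String × String))) (out : List (String × List String)) : Prop := out = extrair_preferencias_combinacao_py_alt combinacao
instance (combinacao : List (String × List (String × String))) (out : List (String × List String)) : Decidable (Spec_extrair_preferencias_combinacao_py combinacao out) := by unfold Spec_extrair_preferencias_combinacao_py; infer_instance

-- ===== CLAIM (what is proved, stated in full; the proofs are below) =====
def Claim_equal_extrair_preferencias_combinacao_py : Prop := ∀ (combinacao : List (String × List (String × String))), Dom_extrair_preferencias_combinacao_py combinacao → Pre_extrair_preferencias_combinacao_py combinacao → Spec_extrair_preferencias_combinacao_py combinacao (extrair_preferencias_combinacao_py combinacao)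

-- ===== LEMMAS AND PROOFS =====
-- The value a garment contributes to the bucket of key `chave`.
def pvPick (chave : String) (roupa : List (String × String)) : List String :=
  match roupa.lookup chave with
  | some v => if v ≠ "" then [v] else []
  | none => []

-- All contributions of the input to the bucket of key `chave`.
def pvC (chave : String) (l : List (String × List (String × String))) : List String :=
  l.flatMap (fun cr => if cr.2 ≠ [] then pvPick chave cr.2 else [])

theorem pvLookup_eq_none {l : List (String × String)} {k : String}
    (h : k ∉ l.map Prod.fst) : l.lookup k = none := by
  induction l with
  | nil => rfl
  | cons p rest ih =>
    simp only [List.map_cons, List.mem_cons, not_or] at h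
    have hb : (k == p.1) = false := beq_eq_false_iff_ne.mpr h.1
    simp [List.lookup, hb, ih h.2]

-- A's fold appends, per field, each garment's contribution.
theorem pvFoldA_eq (l : List (String × List (String × String)))
    (acc : List String × List String × List String) :
    l.foldl pvStepA acc =
      (acc.1 ++ pvC "cor" l, acc.2.1 ++ pvC "estilo" l, acc.2.2 ++ pvC "tipo" l) := by
  induction l generalizing acc with
  | nil => simp [pvC]
  | cons cr rest ih =>
    rw [List.foldl_cons, ih]
    simp only [pvStepA, pvC, List.flatMap_cons, pvPick, ne_eq, ite_not]
    by_cases h : cr.2 = []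
    · simp [h]
    · simp only [h, if_false]
      cases hc : List.lookup "cor" cr.2 <;> cases he : List.lookup "estilo" cr.2 <;>
        cases ht : List.lookup "tipo" cr.2 <;> dsimp only <;>
        (try split_ifs) <;> simp_all

-- B's inner scan over one garment's items (keys distinct) appends exactly the
-- same three contributions to the three buckets.
theorem pvFoldB_inner (items : List (String × String))
    (h : (items.map Prod.fst).Nodup) (a b c : List String) :
    items.foldl pvInnerB (PySem.Dict.mk [("cor", a), ("estilo", b), ("tipo_roupa", c)]) =
      PySem.Dict.mk [("cor", a ++ pvPick "cor" items),
                     ("estilo", b ++ pvPick "estilo" items),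
                     ("tipo_roupa", c ++ pvPick "tipo" items)] := by
  induction items generalizing a b c with
  | nil => simp [pvPick]
  | cons item rest ih =>
    obtain ⟨k, v⟩ := item
    simp only [List.map_cons, List.nodup_cons] at h
    rw [List.foldl_cons]
    have hrest := fun (ch : String) (hne : ch = k) =>
      pvLookup_eq_none (l := rest) (k := ch) (hne ▸ h.1)
    by_cases hk1 : k = "cor"
    · subst hk1
      by_cases hv : v = ""
      · subst hv
        simp [pvInnerB, pvDestino, PySem.Dict.get?, ih h.2, pvPick, List.lookup,
          hrest "cor" rfl]
      · simp [pvInnerB, pvDestino, PySem.Dict.get?, hv, PySem.Dict.modify,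
          PySem.Dict.insert, PySem.Dict.getD, PySem.Dict.contains, ih h.2, pvPick,
          List.lookup, hrest "cor" rfl]
    · by_cases hk2 : k = "estilo"
      · subst hk2
        by_cases hv : v = ""
        · subst hv
          simp [pvInnerB, pvDestino, PySem.Dict.get?, ih h.2, pvPick, List.lookup,
            hrest "estilo" rfl]
        · simp [pvInnerB, pvDestino, PySem.Dict.get?, hv, PySem.Dict.modify,
            PySem.Dict.insert, PySem.Dict.getD, PySem.Dict.contains, ih h.2, pvPick,
            List.lookup, hrest "estilo" rfl]
      · by_cases hk3 : k = "tipo"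
        · subst hk3
          by_cases hv : v = ""
          · subst hv
            simp [pvInnerB, pvDestino, PySem.Dict.get?, ih h.2, pvPick, List.lookup,
              hrest "tipo" rfl]
          · simp [pvInnerB, pvDestino, PySem.Dict.get?, hv, PySem.Dict.modify,
              PySem.Dict.insert, PySem.Dict.getD, PySem.Dict.contains, ih h.2, pvPick,
              List.lookup, hrest "tipo" rfl]
        · have h1 : ("cor" == k) = false := beq_eq_false_iff_ne.mpr (Ne.symm hk1)
          have h2 : ("estilo" == k) = false := beq_eq_false_iff_ne.mpr (Ne.symm hk2)
          have h3 : ("tipo" == k) = false := beq_eq_false_iff_ne.mpr (Ne.symm hk3)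
          simp [pvInnerB, pvDestino, PySem.Dict.get?, h1, h2, h3, ih h.2, pvPick,
            List.lookup]

-- B's outer fold over the garments, bucket by bucket.
theorem pvFoldB_eq (l : List (String × List (String × String)))
    (h : ∀ cr ∈ l, (cr.2.map Prod.fst).Nodup) (a b c : List String) :
    l.foldl (fun pref cr => if cr.2 ≠ [] then cr.2.foldl pvInnerB pref else pref)
        (PySem.Dict.mk [("cor", a), ("estilo", b), ("tipo_roupa", c)]) =
      PySem.Dict.mk [("cor", a ++ pvC "cor" l),
                     ("estilo", b ++ pvC "estilo" l),
                     ("tipo_roupa", c ++ pvC "tipo" l)] := by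
  induction l generalizing a b c with
  | nil => simp [pvC]
  | cons cr rest ih =>
    rw [List.foldl_cons]
    have hrest : ∀ cr' ∈ rest, (cr'.2.map Prod.fst).Nodup :=
      fun cr' hm => h cr' (List.mem_cons_of_mem _ hm)
    by_cases he : cr.2 = []
    · rw [if_neg (by simp [he]), ih hrest]
      simp [pvC, he]
    · rw [if_pos he, pvFoldB_inner cr.2 (h cr (List.mem_cons_self)) a b c, ih hrest]
      simp [pvC, he]

-- ===== VERDICT (by name: the statement is the Claim_ definition above) =====
theorem extrair_preferencias_combinacao_py_spec : Claim_equal_extrair_preferencias_combinacao_py := by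
  intro combinacao _ hpre
  unfold Spec_extrair_preferencias_combinacao_py extrair_preferencias_combinacao_py
    extrair_preferencias_combinacao_py_alt
  rw [pvFoldA_eq, pvFoldB_eq combinacao hpre [] [] []]
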